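-- pv_equiv track=rewrite | github.com/francescacollu/italian-politics-in-4-years-tweets | topics_clustering.py | mytokenizer
-- ===== SOURCE A (Python) =====
-- import string
--
-- def mytokenizer(tweet):
--     tokenlist = tweet.split()
--     tokenlist = [token for token in tokenlist if token != """ ' """ and len(token) > 3] # escludo gli apostrofi, spesso non riconosciuti tra i caratteri di punteggiatura
--     new_tweet = []
--     for t in tokenlist:
--         if (t[0:4] != "http") and (t[0] != "@"):
--             new_tweet.append(t)
--     new_tweet = " ".join(new_tweet)
--     clean_tweet = new_tweet.translate(str.maketrans(string.punctuation, ' '*len(string.punctuation)))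
--     tokens = clean_tweet.split(" ")
--     new_tokens = []
--     for token in tokens:
--         if(token.isalnum() and token.isnumeric()==False):
--             new_tokens.append(token)
--     return new_tokens
-- ===== SOURCE B (Python) =====
-- import string
--
-- # Single character-level scan (a small state machine) instead of A's string pipeline of
-- # split / filter passes / join / translate / re-split: each character is classified once
-- # (whitespace boundary, punctuation boundary, digit, other) while streaming the tweet.
-- _PUNCT = set(string.punctuation)
--
-- def mytokenizer(tweet):
--     out = []        # final tokens
--     pending = []    # kept subtokens of the whitespace-token being scanned
--     cur = []        # chars of the subtoken being scanned
--     cur_has_nondigit = False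
--     tok_len = 0     # length of the whitespace-token so far
--     first = None    # its first character
--     prefix = []     # its first four characters
--     for c in tweet + " ":          # trailing sentinel space flushes the last token
--         if c.isspace():
--             if cur and cur_has_nondigit:
--                 pending.append("".join(cur))
--             if tok_len > 3 and first != "@" and "".join(prefix) != "http":
--                 out.extend(pending)
--             pending = []
--             cur = []
--             cur_has_nondigit = False
--             tok_len = 0
--             first = None
--             prefix = []
--         else:
--             if tok_len == 0:
--                 first = c
--             if tok_len < 4:
--                 prefix.append(c)
--             tok_len += 1
--             if c in _PUNCT:
--                 if cur and cur_has_nondigit: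
--                     pending.append("".join(cur))
--                 cur = []
--                 cur_has_nondigit = False
--             else:
--                 cur.append(c)
--                 if not c.isdigit():
--                     cur_has_nondigit = True
--     return out
-- ===== Notes on version B (the rewrite author's own statement) =====
-- stated objective: alternative
-- what changed: B replaces A's string pipeline (split, two token-filter passes, space-join, global punctuation translate, re-split, final filter pass) by a single character-level state machine that scans the tweet once, classifying each character as whitespace boundary / punctuation boundary / digit / other and emitting kept subtokens on the fly.
import Mathlib
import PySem

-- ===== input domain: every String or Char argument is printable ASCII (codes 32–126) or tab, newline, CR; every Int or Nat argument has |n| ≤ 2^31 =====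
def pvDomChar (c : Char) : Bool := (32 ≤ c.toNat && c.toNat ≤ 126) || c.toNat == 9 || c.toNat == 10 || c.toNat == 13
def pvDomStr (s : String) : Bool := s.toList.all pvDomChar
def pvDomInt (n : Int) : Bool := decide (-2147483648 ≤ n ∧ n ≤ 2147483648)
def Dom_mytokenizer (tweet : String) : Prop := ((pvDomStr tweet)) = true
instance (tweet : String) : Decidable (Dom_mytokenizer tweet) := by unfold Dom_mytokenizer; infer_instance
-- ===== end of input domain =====

-- B replaces A's string pipeline (split / filter passes / join / translate / re-split) by a
-- single character-level state machine that classifies each character once (alternative decomposition).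

-- ===== PORT A =====
-- string.punctuation
def pvPunct : List Char := "!\"#$%&'()*+,-./:;<=>?@[\\]^_`{|}~".toList

-- str.maketrans(string.punctuation, ' '*len(string.punctuation)) applied to one char
def pvTransl (c : Char) : Char := if c ∈ pvPunct then ' ' else c

-- token.isnumeric() — exact on the printable-ASCII domain, where it is the all-digits check
def pvIsnumeric (cs : List Char) : Bool := !cs.isEmpty && cs.all PySem.Chars.isdigit

def mytokenizer (tweet : String) : List String :=
  let tokenlist := PySem.Chars.split₀ tweet.toList
  let tokenlist := tokenlist.filter (fun token =>
    (token != " ' ".toList) && decide (token.length > 3))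
  let new_tweet := tokenlist.foldl (fun acc t =>
    if (PySem.List.slice t (some 0) (some 4) != "http".toList) && (PySem.List.pyGet? t 0 != some '@')
    then acc ++ [t] else acc) []
  let clean_tweet := (PySem.Chars.join [' '] new_tweet).map pvTransl
  let tokens := PySem.Chars.splitOn clean_tweet [' ']
  let new_tokens := tokens.foldl (fun acc token =>
    if PySem.Chars.strIsalnum token && !pvIsnumeric token then acc ++ [token] else acc) []
  new_tokens.map String.ofList

-- ===== PORT B =====
-- the scanner's state: finished tokens, kept subtokens of the current whitespace token,
-- the current subtoken with its has-a-non-digit flag, and the token's length / first char / first four chars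
structure BState where
  out : List (List Char)
  pending : List (List Char)
  cur : List Char
  curHas : Bool
  tokLen : Nat
  first : Option Char
  pre4 : List Char
deriving Repr, DecidableEq

def bstep (s : BState) (c : Char) : BState :=
  if PySem.Chars.isspace c then
    let pending' := if !s.cur.isEmpty && s.curHas then s.pending ++ [s.cur] else s.pending
    let out' := if decide (s.tokLen > 3) && (s.first != some '@') && (s.pre4 != "http".toList)
                then s.out ++ pending' else s.out
    ⟨out', [], [], false, 0, none, []⟩
  else
    let first' := if s.tokLen == 0 then some c else s.first
    let pre4' := if s.tokLen < 4 then s.pre4 ++ [c] else s.pre4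
    if decide (c ∈ pvPunct) then
      let pending' := if !s.cur.isEmpty && s.curHas then s.pending ++ [s.cur] else s.pending
      ⟨s.out, pending', [], false, s.tokLen + 1, first', pre4'⟩
    else
      ⟨s.out, s.pending, s.cur ++ [c], s.curHas || !PySem.Chars.isdigit c, s.tokLen + 1, first', pre4'⟩

def mytokenizer_alt (tweet : String) : List String :=
  ((tweet.toList ++ [' ']).foldl bstep ⟨[], [], [], false, 0, none, []⟩).out.map String.ofList

-- ===== PRECONDITION & SPEC =====
def Spec_mytokenizer (tweet : String) (out : List String) : Prop := out = mytokenizer_alt tweet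
instance (tweet : String) (out : List String) : Decidable (Spec_mytokenizer tweet out) := by unfold Spec_mytokenizer; infer_instance

-- ===== CLAIM (what is proved, stated in full; the proofs are below) =====
def Claim_equal_mytokenizer : Prop := ∀ (tweet : String), Dom_mytokenizer tweet → Spec_mytokenizer tweet (mytokenizer tweet)

-- ===== LEMMAS AND PROOFS =====

-- splitting a char list at the characters satisfying b (Python split(sep)-style: keeps empty pieces)
def splitBy (b : Char → Bool) : List Char → List (List Char)
  | [] => [[]]
  | c :: r => if b c then [] :: splitBy b r
              else match splitBy b r with
                   | [] => [[c]]
                   | h :: t => (c :: h) :: t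

def spB : Char → Bool := fun c => c == ' '
def puB : Char → Bool := fun c => decide (c ∈ pvPunct)

-- A's final keep-test, and the combined token filter of A's first two passes
def pvP (sub : List Char) : Bool := PySem.Chars.strIsalnum sub && !pvIsnumeric sub
def pvG (t : List Char) : Bool :=
  (t == " ' ".toList) || decide (t.length ≤ 3) ||
  (PySem.List.slice t (some 0) (some 4) == "http".toList) || (PySem.List.pyGet? t 0 == some '@')

-- B's two tests
def pieceKeep (p : List Char) : Bool := !p.isEmpty && p.any (fun c => !PySem.Chars.isdigit c)
def keepTok (t : List Char) : Bool :=
  decide (t.length > 3) && (t.head? != some '@') && (t.take 4 != "http".toList)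

-- whitespace-tokenisation as a direct recursion (p = token prefix already read)
def wgo2 : List Char → List Char → List (List Char)
  | [], p => if p.isEmpty then [] else [p]
  | c :: r, p => if PySem.Chars.isspace c then (if p.isEmpty then wgo2 r [] else p :: wgo2 r [])
                 else wgo2 r (p ++ [c])

def consHead (p : List Char) : List (List Char) → List (List Char)
  | [] => [p]
  | h :: t => (p ++ h) :: t

theorem splitBy_ne_nil (b : Char → Bool) (cs : List Char) : splitBy b cs ≠ [] := by
  cases cs with
  | nil => simp [splitBy]
  | cons c r =>
    simp only [splitBy]
    split
    · simp
    · split <;> simp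

theorem go_space (l : List Char) : ∀ (fuel : Nat) (cur : List Char) (acc : List (List Char)),
    l.length ≤ fuel →
    PySem.Chars.splitOn.go [' '] fuel l cur acc = acc.reverse ++ consHead cur.reverse (splitBy spB l) := by
  induction l with
  | nil =>
    intro fuel cur acc _
    cases fuel <;> simp [PySem.Chars.splitOn.go, splitBy, consHead]
  | cons c rest ih =>
    intro fuel cur acc hf
    cases fuel with
    | zero => simp at hf
    | succ f =>
      rw [PySem.Chars.splitOn.go.eq_def]
      simp only []
      by_cases hc : c = ' '
      · subst hc
        have hpre : [' '].isPrefixOf (' ' :: rest) = true := by simp [List.isPrefixOf]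
        simp only [hpre, if_pos]
        have hd : List.drop [' '].length (' ' :: rest) = rest := rfl
        rw [hd, ih f [] ((cur.reverse) :: acc) (by simpa using Nat.le_of_succ_le_succ hf)]
        obtain ⟨h, t, ht⟩ : ∃ h t, splitBy spB rest = h :: t := by
          cases hsr : splitBy spB rest with
          | nil => exact absurd hsr (splitBy_ne_nil spB rest)
          | cons h t => exact ⟨h, t, rfl⟩
        simp [splitBy, spB, ht, consHead]
      · have hpre : [' '].isPrefixOf (c :: rest) = false := by
          simp [List.isPrefixOf]; exact fun h => hc h.symm
        rw [if_neg (by simp [hpre])]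
        rw [ih f (c :: cur) acc (by simpa using Nat.le_of_succ_le_succ hf)]
        obtain ⟨h, t, ht⟩ : ∃ h t, splitBy spB rest = h :: t := by
          cases hsr : splitBy spB rest with
          | nil => exact absurd hsr (splitBy_ne_nil spB rest)
          | cons h t => exact ⟨h, t, rfl⟩
        simp [splitBy, spB, hc, ht, consHead]

theorem splitOn_space_eq (cs : List Char) : PySem.Chars.splitOn cs [' '] = splitBy spB cs := by
  rw [PySem.Chars.splitOn, go_space cs (cs.length + 1) [] [] (Nat.le_succ _)]
  cases h : splitBy spB cs with
  | nil => exact absurd h (splitBy_ne_nil spB cs)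
  | cons a t => simp [consHead]

theorem splitBy_append_boundary (b : Char → Bool) (c : Char) (hc : b c = true) (x y : List Char) :
    splitBy b (x ++ c :: y) = splitBy b x ++ splitBy b y := by
  induction x with
  | nil => simp [splitBy, hc]
  | cons a r ih =>
    by_cases ha : b a = true
    · simp only [List.cons_append, splitBy, ha, if_pos, ih, List.cons_append]
    · simp only [List.cons_append, splitBy, ih]
      cases hsr : splitBy b r with
      | nil => exact absurd hsr (splitBy_ne_nil b r)
      | cons h t => simp [ha]

theorem join_map_transl (L : List (List Char)) :
    (PySem.Chars.join [' '] L).map pvTransl = PySem.Chars.join [' '] (L.map (List.map pvTransl)) := by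
  induction L with
  | nil => simp [PySem.Chars.join_nil]
  | cons a rest ih =>
    cases rest with
    | nil => simp [PySem.Chars.join_singleton]
    | cons b r =>
      rw [List.map_cons, List.map_cons, PySem.Chars.join_cons_cons, PySem.Chars.join_cons_cons,
        ← List.map_cons, ← ih]
      simp [pvTransl, pvPunct]

theorem filter_splitBy_join (P : List Char → Bool) (hP : P [] = false) (L : List (List Char)) :
    (splitBy spB (PySem.Chars.join [' '] L)).filter P = L.flatMap (fun t => (splitBy spB t).filter P) := by
  induction L with
  | nil => simp [PySem.Chars.join_nil, splitBy, hP]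
  | cons a rest ih =>
    cases rest with
    | nil => simp [PySem.Chars.join_singleton]
    | cons b r =>
      rw [PySem.Chars.join_cons_cons, List.flatMap_cons, ← ih]
      have h : a ++ [' '] ++ PySem.Chars.join [' '] (b :: r) = a ++ ' ' :: PySem.Chars.join [' '] (b :: r) := by simp
      rw [h, splitBy_append_boundary spB ' ' rfl, List.filter_append]

-- A's value, characterised as one flatMap over the whitespace tokens
theorem mytokenizer_char (tweet : String) :
    mytokenizer tweet =
      (((PySem.Chars.split₀ tweet.toList).filter (fun t => !pvG t)).flatMap
        (fun t => (splitBy spB (t.map pvTransl)).filter pvP)).map String.ofList := by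
  unfold mytokenizer
  simp only []
  set ts := PySem.Chars.split₀ tweet.toList with hts
  -- A's first two passes keep exactly the tokens with ¬ pvG
  have hA2 : (ts.filter (fun token => (token != " ' ".toList) && decide (token.length > 3))).foldl
      (fun acc t => if (PySem.List.slice t (some 0) (some 4) != "http".toList) &&
        (PySem.List.pyGet? t 0 != some '@') then acc ++ [t] else acc) []
      = ts.filter (fun t => !pvG t) := by
    have h := PySem.List.foldl_append_if
      (fun t => (PySem.List.slice t (some 0) (some 4) != "http".toList) &&
        (PySem.List.pyGet? t 0 != some '@')) id
      (ts.filter (fun token => (token != " ' ".toList) && decide (token.length > 3))) []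
    simp only [id_eq, List.map_id, List.nil_append] at h
    rw [h, List.filter_filter]
    apply List.filter_congr
    intro t _
    rw [pvG]
    by_cases h1 : t = " ' ".toList <;>
      by_cases h2 : t.length ≤ 3 <;>
        by_cases h3 : PySem.List.slice t (some 0) (some 4) = "http".toList <;>
          by_cases h4 : PySem.List.pyGet? t 0 = some '@' <;>
            simp [h1, h2, h3, h4, ← Nat.not_le, bne, Bool.and_comm, Bool.and_left_comm]
  rw [hA2]
  have hPnil : pvP [] = false := by decide
  have h := PySem.List.foldl_append_if
    (fun token => PySem.Chars.strIsalnum token && !pvIsnumeric token) id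
    (splitBy spB ((PySem.Chars.join [' '] (ts.filter (fun t => !pvG t))).map pvTransl)) []
  simp only [id_eq, List.map_id, List.nil_append] at h
  rw [splitOn_space_eq, h]
  have hfun : (fun token => PySem.Chars.strIsalnum token && !pvIsnumeric token) = pvP := rfl
  rw [hfun, join_map_transl, filter_splitBy_join pvP hPnil, List.flatMap_map]

-- split₀ agrees with wgo2
theorem split0_go_eq (cs : List Char) : ∀ (cur : List Char) (acc : List (List Char)),
    PySem.Chars.split₀.go cs cur acc = acc.reverse ++ wgo2 cs cur.reverse := by
  induction cs with
  | nil =>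
    intro cur acc
    by_cases h : cur = [] <;> simp [PySem.Chars.split₀.go, wgo2, h]
  | cons c r ih =>
    intro cur acc
    by_cases hc : PySem.Chars.isspace c = true
    · by_cases h : cur = []
      · simp [PySem.Chars.split₀.go, wgo2, hc, h, ih]
      · simp [PySem.Chars.split₀.go, wgo2, hc, h, ih]
    · simp only [PySem.Chars.split₀.go, wgo2, hc, if_neg, Bool.not_eq_true] at *
      rw [ih (c :: cur) acc]
      simp

theorem split0_eq_wgo2 (cs : List Char) : PySem.Chars.split₀ cs = wgo2 cs [] := by
  rw [PySem.Chars.split₀, split0_go_eq]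
  simp

-- appending one non-boundary char to the input extends the last piece
def snocPiece : List (List Char) → Char → List (List Char)
  | [], c => [[c]]
  | [h], c => [h ++ [c]]
  | h :: h' :: t, c => h :: snocPiece (h' :: t) c

theorem splitBy_append_nonboundary (b : Char → Bool) (c : Char) (hc : b c = false) (p : List Char) :
    splitBy b (p ++ [c]) = snocPiece (splitBy b p) c := by
  induction p with
  | nil => simp [splitBy, hc, snocPiece]
  | cons a q ih =>
    by_cases ha : b a = true
    · simp only [List.cons_append, splitBy, ha, if_pos, ih]
      cases hsq : splitBy b q with
      | nil => exact absurd hsq (splitBy_ne_nil b q)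
      | cons h t => simp [snocPiece]
    · simp only [List.cons_append, splitBy, ih]
      cases hsq : splitBy b q with
      | nil => exact absurd hsq (splitBy_ne_nil b q)
      | cons h t =>
        simp only [ha, if_neg, Bool.false_eq_true, not_false_iff]
        cases t <;> simp [snocPiece]

theorem snocPiece_ne_nil (l : List (List Char)) (c : Char) : snocPiece l c ≠ [] := by
  cases l with
  | nil => simp [snocPiece]
  | cons h t => cases t <;> simp [snocPiece]

theorem dropLast_snocPiece (l : List (List Char)) (c : Char) (h : l ≠ []) :
    (snocPiece l c).dropLast = l.dropLast := by
  induction l with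
  | nil => exact absurd rfl h
  | cons a t ih =>
    cases t with
    | nil => simp [snocPiece]
    | cons b t' =>
      rw [show snocPiece (a :: b :: t') c = a :: snocPiece (b :: t') c from rfl,
        List.dropLast_cons_of_ne_nil (snocPiece_ne_nil _ _),
        List.dropLast_cons_of_ne_nil (by simp), ih (by simp)]

theorem getLastD_snocPiece (l : List (List Char)) (c : Char) (h : l ≠ []) :
    ∀ (d : List Char), (snocPiece l c).getLastD d = l.getLastD d ++ [c] := by
  induction l with
  | nil => exact absurd rfl h
  | cons a t ih =>
    intro d
    cases t with
    | nil => simp [snocPiece]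
    | cons b t' =>
      rw [show snocPiece (a :: b :: t') c = a :: snocPiece (b :: t') c from rfl]
      rw [List.getLastD_cons, List.getLastD_cons]
      exact ih (by simp) a

theorem filter_eq_dropLast_filter (f : List Char → Bool) (l : List (List Char)) (h : l ≠ []) :
    l.filter f = l.dropLast.filter f ++ (if f (l.getLastD []) then [l.getLastD []] else []) := by
  conv_lhs => rw [← List.dropLast_append_getLast h]
  rw [List.filter_append]
  congr 1
  have hg : l.getLastD [] = l.getLast h := by
    rw [List.getLastD_eq_getLast?, List.getLast?_eq_some_getLast h]; rfl
  rw [← hg]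
  by_cases hf : f (l.getLastD []) = true <;>
    simp only [List.getLastD_eq_getLast?] at hf ⊢ <;> simp [hf]

-- the automaton's state after reading the (non-whitespace) token prefix p
def lastP (p : List Char) : List Char := (splitBy puB p).getLastD []
def stateOf (out : List (List Char)) (p : List Char) : BState :=
  ⟨out, ((splitBy puB p).dropLast).filter pieceKeep, lastP p,
    (lastP p).any (fun c => !PySem.Chars.isdigit c), p.length, p.head?, p.take 4⟩

theorem bstep_space (out : List (List Char)) (p : List Char) (c : Char)
    (hc : PySem.Chars.isspace c = true) :
    bstep (stateOf out p) c
      = stateOf (out ++ if keepTok p then (splitBy puB p).filter pieceKeep else []) [] := by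
  have hfull := filter_eq_dropLast_filter pieceKeep (splitBy puB p) (splitBy_ne_nil puB p)
  have hb : ∀ (o pnd : List (List Char)) (cur : List Char) (ch : Bool) (n : Nat)
      (f : Option Char) (pr : List Char),
      bstep ⟨o, pnd, cur, ch, n, f, pr⟩ c
        = ⟨if decide (n > 3) && (f != some '@') && (pr != "http".toList)
            then o ++ (if !cur.isEmpty && ch then pnd ++ [cur] else pnd) else o,
          [], [], false, 0, none, []⟩ := by
    intro o pnd cur ch n f pr
    simp only [bstep, hc, if_true]
  simp only [stateOf]
  rw [hb, BState.mk.injEq]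
  refine ⟨?_, rfl, rfl, rfl, rfl, rfl, rfl⟩
  rw [show (decide (p.length > 3) && (p.head? != some '@') && (p.take 4 != "http".toList))
        = keepTok p from rfl,
      show (!(lastP p).isEmpty && ((lastP p).any (fun c => !PySem.Chars.isdigit c)))
        = pieceKeep (lastP p) from rfl]
  have hlast : lastP p = (splitBy puB p).getLastD [] := rfl
  by_cases hk : keepTok p = true <;> by_cases hpk : pieceKeep (lastP p) = true <;>
    simp only [hlast, List.getLastD_eq_getLast?] at hpk hfull <;>
    simp [hk, hpk, hfull, lastP, List.getLastD_eq_getLast?]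

theorem bstep_nonspace (out : List (List Char)) (p : List Char) (c : Char)
    (hc : PySem.Chars.isspace c = false) :
    bstep (stateOf out p) c = stateOf out (p ++ [c]) := by
  have hfirst : (if p.length == 0 then some c else p.head?) = (p ++ [c]).head? := by
    cases p <;> simp
  have hpre : (if p.length < 4 then p.take 4 ++ [c] else p.take 4) = (p ++ [c]).take 4 := by
    by_cases h4 : p.length < 4
    · have h5 : 4 - p.length = (4 - p.length - 1) + 1 := by omega
      rw [if_pos h4, List.take_append, h5]
      simp
    · rw [if_neg h4, List.take_append, show 4 - p.length = 0 from by omega]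
      simp
  have hlen : (p ++ [c]).length = p.length + 1 := by simp
  by_cases hpu : puB c = true
  · have hsplit : splitBy puB (p ++ [c]) = splitBy puB p ++ [[]] := by
      rw [show p ++ [c] = p ++ c :: [] from rfl, splitBy_append_boundary puB c hpu p []]; rfl
    have hfull := filter_eq_dropLast_filter pieceKeep (splitBy puB p) (splitBy_ne_nil puB p)
    have hpu' : decide (c ∈ pvPunct) = true := hpu
    have hb : ∀ (o pnd : List (List Char)) (cur : List Char) (ch : Bool) (n : Nat)
        (f : Option Char) (pr : List Char),
        bstep ⟨o, pnd, cur, ch, n, f, pr⟩ c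
          = ⟨o, (if !cur.isEmpty && ch then pnd ++ [cur] else pnd), [], false, n + 1,
              (if n == 0 then some c else f), (if n < 4 then pr ++ [c] else pr)⟩ := by
      intro o pnd cur ch n f pr
      simp only [bstep, hc, Bool.false_eq_true, if_false, hpu', if_true]
    simp only [stateOf]
    rw [hb, BState.mk.injEq]
    refine ⟨rfl, ?_, ?_, ?_, hlen.symm, hfirst, hpre⟩
    · rw [show (!(lastP p).isEmpty && ((lastP p).any (fun c => !PySem.Chars.isdigit c)))
            = pieceKeep (lastP p) from rfl]
      have hlast : lastP p = (splitBy puB p).getLastD [] := rfl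
      rw [hsplit, List.dropLast_concat]
      by_cases hpk : pieceKeep (lastP p) = true <;>
        simp only [hlast, List.getLastD_eq_getLast?] at hpk hfull <;>
        simp [hpk, hfull, lastP, List.getLastD_eq_getLast?]
    · rw [lastP, hsplit]
      simp
    · rw [lastP, hsplit]
      simp
  · have hpuf : puB c = false := by
      cases h : puB c
      · rfl
      · exact absurd h hpu
    have hsnoc := splitBy_append_nonboundary puB c hpuf p
    have hpu' : decide (c ∈ pvPunct) = false := hpuf
    have hb : ∀ (o pnd : List (List Char)) (cur : List Char) (ch : Bool) (n : Nat)
        (f : Option Char) (pr : List Char),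
        bstep ⟨o, pnd, cur, ch, n, f, pr⟩ c
          = ⟨o, pnd, cur ++ [c], ch || !PySem.Chars.isdigit c, n + 1,
              (if n == 0 then some c else f), (if n < 4 then pr ++ [c] else pr)⟩ := by
      intro o pnd cur ch n f pr
      simp only [bstep, hc, Bool.false_eq_true, if_false, hpu']
    simp only [stateOf]
    rw [hb, BState.mk.injEq]
    refine ⟨rfl, ?_, ?_, ?_, hlen.symm, hfirst, hpre⟩
    · rw [hsnoc, dropLast_snocPiece _ _ (splitBy_ne_nil puB p)]
    · rw [lastP, lastP, hsnoc, getLastD_snocPiece _ _ (splitBy_ne_nil puB p)]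
    · rw [lastP, lastP, hsnoc, getLastD_snocPiece _ _ (splitBy_ne_nil puB p)]
      simp

theorem run_main (cs : List Char) : ∀ (p : List Char) (out : List (List Char)),
    ((cs ++ [' ']).foldl bstep (stateOf out p)).out
      = out ++ ((wgo2 cs p).filter keepTok).flatMap (fun t => (splitBy puB t).filter pieceKeep) := by
  induction cs with
  | nil =>
    intro p out
    rw [List.nil_append, List.foldl_cons, List.foldl_nil, bstep_space out p ' ' (by decide)]
    by_cases hp : p.isEmpty = true
    · have hp' : p = [] := by simpa using hp
      subst hp'
      simp [wgo2, keepTok, stateOf]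
    · simp only [wgo2, hp, Bool.false_eq_true, if_false, stateOf]
      by_cases hk : keepTok p = true <;> simp [hk]
  | cons c r ih =>
    intro p out
    rw [List.cons_append, List.foldl_cons]
    by_cases hc : PySem.Chars.isspace c = true
    · rw [bstep_space out p c hc, ih]
      by_cases hp : p.isEmpty = true
      · have hp' : p = [] := by simpa using hp
        subst hp'
        simp [wgo2, hc, keepTok]
      · simp only [wgo2, hc, if_true, hp, Bool.false_eq_true, if_false]
        by_cases hk : keepTok p = true <;> simp [hk]
    · have hc' : PySem.Chars.isspace c = false := by
        cases h : PySem.Chars.isspace c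
        · rfl
        · exact absurd h hc
      rw [bstep_nonspace out p c hc', ih]
      simp [wgo2, hc']

theorem alt_char (tweet : String) :
    mytokenizer_alt tweet =
      (((wgo2 tweet.toList []).filter keepTok).flatMap
        (fun t => (splitBy puB t).filter pieceKeep)).map String.ofList := by
  have hinit : (⟨[], [], [], false, 0, none, []⟩ : BState) = stateOf [] [] := rfl
  rw [mytokenizer_alt, hinit, run_main]
  simp

-- membership facts
theorem wgo2_mem (cs : List Char) : ∀ (p t : List Char), t ∈ wgo2 cs p → ∀ c ∈ t,
    (c ∈ cs ∧ PySem.Chars.isspace c = false) ∨ c ∈ p := by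
  induction cs with
  | nil =>
    intro p t ht c hc
    by_cases hp : p.isEmpty = true
    · simp [wgo2, hp] at ht
    · simp only [wgo2, hp, Bool.false_eq_true, if_false, List.mem_singleton] at ht
      subst ht
      exact Or.inr hc
  | cons a r ih =>
    intro p t ht c hc
    by_cases ha : PySem.Chars.isspace a = true
    · simp only [wgo2, ha, if_true] at ht
      by_cases hp : p.isEmpty = true
      · rw [if_pos hp] at ht
        rcases ih [] t ht c hc with h | h
        · exact Or.inl ⟨List.mem_cons_of_mem a h.1, h.2⟩
        · simp at h
      · rw [if_neg hp] at ht
        rcases List.mem_cons.mp ht with h | h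
        · subst h; exact Or.inr hc
        · rcases ih [] t h c hc with h' | h'
          · exact Or.inl ⟨List.mem_cons_of_mem a h'.1, h'.2⟩
          · simp at h'
    · have ha' : PySem.Chars.isspace a = false := by
        cases h : PySem.Chars.isspace a
        · rfl
        · exact absurd h ha
      simp only [wgo2, ha', Bool.false_eq_true, if_false] at ht
      rcases ih (p ++ [a]) t ht c hc with h | h
      · exact Or.inl ⟨List.mem_cons_of_mem a h.1, h.2⟩
      · rcases List.mem_append.mp h with h' | h'
        · exact Or.inr h'
        · simp only [List.mem_singleton] at h'
          subst h'
          exact Or.inl ⟨List.mem_cons_self, ha'⟩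

theorem splitBy_mem (b : Char → Bool) (l : List Char) : ∀ p ∈ splitBy b l, ∀ c ∈ p,
    c ∈ l ∧ b c = false := by
  induction l with
  | nil =>
    intro p hp c hc
    simp only [splitBy, List.mem_singleton] at hp
    subst hp
    simp at hc
  | cons a r ih =>
    intro p hp c hc
    by_cases ha : b a = true
    · simp only [splitBy, ha, if_true, List.mem_cons] at hp
      rcases hp with h | h
      · subst h; simp at hc
      · obtain ⟨hc', hb⟩ := ih p h c hc
        exact ⟨List.mem_cons_of_mem a hc', hb⟩
    · have ha' : b a = false := by
        cases h : b a
        · rfl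
        · exact absurd h ha
      simp only [splitBy, ha', Bool.false_eq_true, if_false] at hp
      obtain ⟨h, t, ht⟩ : ∃ h t, splitBy b r = h :: t := by
        cases hsr : splitBy b r with
        | nil => exact absurd hsr (splitBy_ne_nil b r)
        | cons h t => exact ⟨h, t, rfl⟩
      rw [ht] at hp
      rcases List.mem_cons.mp hp with h1 | h1
      · subst h1
        rcases List.mem_cons.mp hc with h2 | h2
        · subst h2; exact ⟨List.mem_cons_self, ha'⟩
        · obtain ⟨hc', hb⟩ := ih h (by rw [ht]; exact List.mem_cons_self) c h2
          exact ⟨List.mem_cons_of_mem a hc', hb⟩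
      · obtain ⟨hc', hb⟩ := ih p (by rw [ht]; exact List.mem_cons_of_mem h h1) c hc
        exact ⟨List.mem_cons_of_mem a hc', hb⟩

-- character classification on the printable domain
def pvPrintables : List Char := (List.range 95).map (fun n => Char.ofNat (n + 32))

theorem printable_class :
    pvPrintables.all (fun c => PySem.Chars.isspace c || decide (c ∈ pvPunct) || PySem.Chars.isalnum c) = true := by
  decide

theorem char_alnum (c : Char) (hd : pvDomChar c = true) (hs : PySem.Chars.isspace c = false)
    (hp : decide (c ∈ pvPunct) = false) : PySem.Chars.isalnum c = true := by
  have hd' : ((32 ≤ c.toNat ∧ c.toNat ≤ 126 ∨ c.toNat = 9) ∨ c.toNat = 10) ∨ c.toNat = 13 := by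
    simpa [pvDomChar] using hd
  have h32 : c.toNat ≠ 32 := fun h => by simp [PySem.Chars.isspace, h] at hs
  have h913 : ¬(9 ≤ c.toNat ∧ c.toNat ≤ 13) := fun h => by
    simp [PySem.Chars.isspace, h.1, h.2] at hs
  have hbnd : 32 ≤ c.toNat ∧ c.toNat ≤ 126 := by
    rcases hd' with ((h | h) | h) | h
    · exact h
    all_goals exact absurd ⟨by omega, by omega⟩ h913
  have h1 : c.toNat - 32 < 95 := by omega
  have h2 : c.toNat - 32 + 32 = c.toNat := by omega
  have hmem : c ∈ pvPrintables :=
    List.mem_map.mpr ⟨c.toNat - 32, List.mem_range.mpr h1, by rw [h2, Char.ofNat_toNat]⟩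
  have h := List.all_eq_true.mp printable_class c hmem
  simpa only [hs, hp, Bool.false_or] using h

theorem any_not_eq_not_all (f : Char → Bool) (l : List Char) :
    l.any (fun c => !f c) = !l.all f := by
  induction l with
  | nil => rfl
  | cons a r ih => simp [ih, Bool.not_and]

-- token-level agreements (for tokens of non-whitespace, in-domain characters)
theorem splitBy_transl (t : List Char) (h : ∀ c ∈ t, PySem.Chars.isspace c = false) :
    splitBy spB (t.map pvTransl) = splitBy puB t := by
  induction t with
  | nil => rfl
  | cons c r ih =>
    have hc : PySem.Chars.isspace c = false := h c List.mem_cons_self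
    have ih' := ih (fun x hx => h x (List.mem_cons_of_mem c hx))
    by_cases hcp : c ∈ pvPunct
    · have h1 : pvTransl c = ' ' := by simp [pvTransl, hcp]
      have h2 : puB c = true := by simp [puB, hcp]
      simp only [List.map_cons, splitBy, h1, h2, spB, beq_self_eq_true, if_true, ih']
    · have h1 : pvTransl c = c := by simp [pvTransl, hcp]
      have h2 : puB c = false := by simp [puB, hcp]
      have h3 : spB c = false := by
        simp only [spB, beq_eq_false_iff_ne, ne_eq]
        intro hcs
        rw [hcs] at hc
        exact absurd hc (by decide)
      simp only [List.map_cons, splitBy, h1, h2, h3, Bool.false_eq_true, if_false, ih']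

theorem keep_agree (t : List Char) (h : ∀ c ∈ t, PySem.Chars.isspace c = false) :
    (!pvG t) = keepTok t := by
  have h1 : (t == " ' ".toList) = false := by
    apply beq_false_of_ne
    intro he
    have := h ' ' (by rw [he]; decide)
    exact absurd this (by decide)
  have hslice : PySem.List.slice t (some 0) (some 4) = t.take 4 := by
    rw [show PySem.List.slice t (some 0) (some 4) = PySem.List.slice t none (some 4) from by
      simp [PySem.List.slice]]
    simp [PySem.List.slice_to]
  rw [pvG, keepTok, h1, hslice, PySem.List.pyGet?_zero, Bool.false_or]
  by_cases h2 : t.length ≤ 3 <;> by_cases h3 : t.take 4 = "http".toList <;>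
    by_cases h4 : t[0]? = some '@' <;>
      simp [h2, h3, h4, List.head?_eq_getElem?, ← Nat.not_le, bne, Bool.and_comm]

theorem piece_agree (p : List Char) (h : ∀ c ∈ p, PySem.Chars.isalnum c = true) :
    pvP p = pieceKeep p := by
  have hall : p.all PySem.Chars.isalnum = true := List.all_eq_true.mpr h
  cases e : p.isEmpty <;> cases d : p.all PySem.Chars.isdigit <;>
    simp [pvP, pieceKeep, PySem.Chars.strIsalnum, pvIsnumeric, hall, any_not_eq_not_all, e, d]

theorem flatMap_congr_mem {α β : Type} (l : List α) (f g : α → List β)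
    (h : ∀ t ∈ l, f t = g t) : l.flatMap f = l.flatMap g := by
  induction l with
  | nil => rfl
  | cons a r ih =>
    rw [List.flatMap_cons, List.flatMap_cons, h a List.mem_cons_self,
      ih (fun t ht => h t (List.mem_cons_of_mem a ht))]

theorem mytokenizer_eq_alt (tweet : String) (hd : Dom_mytokenizer tweet) :
    mytokenizer tweet = mytokenizer_alt tweet := by
  have hDom : ∀ c ∈ tweet.toList, pvDomChar c = true := by
    have := hd
    simp only [Dom_mytokenizer, pvDomStr, List.all_eq_true] at this
    exact this
  have hT : ∀ t ∈ wgo2 tweet.toList [], ∀ c ∈ t,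
      PySem.Chars.isspace c = false ∧ pvDomChar c = true := by
    intro t ht c hc
    rcases wgo2_mem tweet.toList [] t ht c hc with ⟨hcs, hns⟩ | hmem
    · exact ⟨hns, hDom c hcs⟩
    · simp at hmem
  rw [mytokenizer_char, alt_char, split0_eq_wgo2]
  congr 1
  rw [List.filter_congr (fun t ht => keep_agree t (fun c hc => (hT t ht c hc).1))]
  have hfg : ∀ t ∈ (wgo2 tweet.toList []).filter keepTok,
      (splitBy spB (t.map pvTransl)).filter pvP = (splitBy puB t).filter pieceKeep := by
    intro t ht
    have ht' := List.mem_of_mem_filter ht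
    have hns : ∀ c ∈ t, PySem.Chars.isspace c = false := fun c hc => (hT t ht' c hc).1
    rw [splitBy_transl t hns]
    apply List.filter_congr
    intro pc hpc
    apply piece_agree
    intro ch hch
    obtain ⟨hmem, hpu⟩ := splitBy_mem puB t pc hpc ch hch
    exact char_alnum ch (hT t ht' ch hmem).2 (hT t ht' ch hmem).1 hpu
  exact flatMap_congr_mem _ _ _ hfg

-- ===== VERDICT (by name: the statement is the Claim_ definition above) =====
theorem mytokenizer_spec : Claim_equal_mytokenizer := by
  intro tweet hd
  show _ = _
  exact mytokenizer_eq_alt tweet hd
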